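-- pv_equiv track=rewrite | github.com/wplohrmann/projects | code_jam2021/qualification_round/reversort_engineering.py | get_subcosts
-- ===== SOURCE A (Python) =====
-- def get_subcosts(n, c):
--     costs = list(range(2, n+1))[::-1]
--     excess = sum(costs) - c
--     if excess < 0:
--         return None
--     for i, cost in enumerate(costs):
--         if excess == 0:
--             return costs
--         trim = min(excess, cost-1)
--         excess -= trim
--         costs[i] -= trim
--     if excess == 0:
--         return costs
--
--     return None
-- ===== SOURCE B (Python) =====
-- def get_subcosts(n, c):
--     m = max(n - 1, 0)                 # len of costs [n, n-1, ..., 2]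
--     total = m * (n + 2) // 2          # closed form for 2 + 3 + ... + n
--     excess = total - c
--     if excess < 0 or excess > total - m:
--         return None
--     # binary search: largest k in [0, m] with doubled prefix capacity
--     # k*(2n - k - 1) <= 2*excess  (prefix capacity = sum of (n-i)-1 for i < k)
--     lo, hi = 0, m
--     while lo < hi:
--         mid = (lo + hi + 1) // 2
--         if mid * (2 * n - mid - 1) <= 2 * excess:
--             lo = mid
--         else:
--             hi = mid - 1
--     k = lo
--     rem = excess - k * (2 * n - k - 1) // 2
--     res = [1] * k + list(range(2, n - k + 1))[::-1]
--     if rem > 0: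
--         res[k] -= rem
--     return res
-- ===== Notes on version B (the rewrite author's own statement) =====
-- stated objective: alternative
-- what changed: Replaces A's greedy left-to-right subtraction over the materialised costs list by pure arithmetic: a closed-form total, a binary search for the trim breakpoint k using the capacity formula k*(2n-k-1)/2 (never scanning the list), and direct construction [1]*k + range tail with one boundary adjustment.
import Mathlib
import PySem

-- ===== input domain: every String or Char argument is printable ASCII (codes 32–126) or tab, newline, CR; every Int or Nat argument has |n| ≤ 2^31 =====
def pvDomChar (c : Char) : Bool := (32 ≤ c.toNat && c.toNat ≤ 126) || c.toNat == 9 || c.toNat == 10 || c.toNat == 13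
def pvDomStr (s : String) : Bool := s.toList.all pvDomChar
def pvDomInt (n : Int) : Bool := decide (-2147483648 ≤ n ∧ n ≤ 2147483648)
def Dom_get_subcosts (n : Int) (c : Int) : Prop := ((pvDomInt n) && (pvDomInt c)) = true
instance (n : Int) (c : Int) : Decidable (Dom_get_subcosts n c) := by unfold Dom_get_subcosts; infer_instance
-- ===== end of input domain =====

-- B replaces A's greedy element-by-element subtraction over the costs list by arithmetic:
-- a closed-form total, a binary search for the trim breakpoint via the capacity formula
-- k*(2n-k-1)/2, and direct construction of the result (alternative decomposition, same cost).


-- ===== PORT A =====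
-- A's for-loop over `enumerate(costs)` with in-place mutation of costs[i], rendered as the
-- obvious structural recursion: the already-processed (mutated) prefix is rebuilt by cons,
-- the early `return costs` mid-loop returns the untouched remainder as-is, and the
-- post-loop `if excess == 0` check is the [] case.
def aLoop : List Int → Int → Option (List Int)
  | [], e => if e = 0 then some [] else none
  | x :: xs, e =>
    if e = 0 then some (x :: xs)
    else
      let trim := min e (x - 1)
      (aLoop xs (e - trim)).map (fun r => (x - trim) :: r)

def get_subcosts (n : Int) (c : Int) : Option (List Int) :=
  let costs := (PySem.List.pyRange 2 (n + 1) 1).reverse   -- list(range(2, n+1))[::-1]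
  let excess := costs.sum - c
  if excess < 0 then none
  else aLoop costs excess

-- ===== PORT B =====
-- B's `while lo < hi` binary-search loop, as fuel recursion on the interval width
-- ((hi - lo).toNat steps always suffice, so this computes exactly the Python loop).
def bsearchGo : Nat → Int → Int → Int → Int → Int
  | 0, _, _, lo, _ => lo
  | fuel + 1, n, e, lo, hi =>
    if lo < hi then
      if (PySem.Int.floordiv (lo + hi + 1) 2) * (2 * n - (PySem.Int.floordiv (lo + hi + 1) 2) - 1) ≤ 2 * e then
        bsearchGo fuel n e (PySem.Int.floordiv (lo + hi + 1) 2) hi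
      else
        bsearchGo fuel n e lo ((PySem.Int.floordiv (lo + hi + 1) 2) - 1)
    else lo

def bsearch (n e lo hi : Int) : Int := bsearchGo (hi - lo).toNat n e lo hi

def get_subcosts_alt (n : Int) (c : Int) : Option (List Int) :=
  let m := max (n - 1) 0
  let total := PySem.Int.floordiv (m * (n + 2)) 2
  let excess := total - c
  if excess < 0 ∨ excess > total - m then none
  else
    let k := bsearch n excess 0 m
    let rem := excess - PySem.Int.floordiv (k * (2 * n - k - 1)) 2
    let res := List.replicate k.toNat 1 ++ (PySem.List.pyRange 2 (n - k + 1) 1).reverse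
    -- Python `res[k] -= rem`: k is in range whenever rem > 0, this never raises
    if rem > 0 then some (res.modify k.toNat (· - rem))
    else some res

-- ===== PRECONDITION & SPEC =====
def Spec_get_subcosts (n : Int) (c : Int) (out : Option (List Int)) : Prop := out = get_subcosts_alt n c
instance (n : Int) (c : Int) (out : Option (List Int)) : Decidable (Spec_get_subcosts n c out) := by unfold Spec_get_subcosts; infer_instance

-- ===== CLAIM (what is proved, stated in full; the proofs are below) =====
def Claim_equal_get_subcosts : Prop := ∀ (n : Int) (c : Int), Dom_get_subcosts n c → Spec_get_subcosts n c (get_subcosts n c)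

-- ===== LEMMAS AND PROOFS =====

-- trimming capacity of a list (how much the greedy loop can subtract in total)
def cap (xs : List Int) : Int := (xs.map (· - 1)).sum

theorem cap_nil : cap [] = 0 := rfl

theorem cap_cons (x : Int) (xs : List Int) : cap (x :: xs) = (x - 1) + cap xs := by
  simp [cap]

theorem cap_nonneg (xs : List Int) (h : ∀ x ∈ xs, 2 ≤ x) : 0 ≤ cap xs := by
  induction xs with
  | nil => simp [cap]
  | cons x xs ih =>
    have hx := h x (by simp)
    have := ih (fun y hy => h y (by simp [hy]))
    rw [cap_cons]; omega

theorem cap_eq_sum_sub_len (xs : List Int) : cap xs = xs.sum - xs.length := by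
  induction xs with
  | nil => simp [cap]
  | cons x xs ih => rw [cap_cons, ih]; simp; omega

theorem half_double (s : Int) : PySem.Int.floordiv (2 * s) 2 = s := by
  rw [PySem.Int.floordiv_eq_ediv_of_pos (by omega : (0:Int) < 2)]; omega

theorem aLoop_zero (xs : List Int) : aLoop xs 0 = some xs := by
  cases xs <;> simp [aLoop]

theorem aLoop_none (xs : List Int) (e : Int) (h : ∀ x ∈ xs, 2 ≤ x) (he : cap xs < e) :
    aLoop xs e = none := by
  induction xs generalizing e with
  | nil =>
    have h0 : e ≠ 0 := by rw [cap_nil] at he; omega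
    simp [aLoop, h0]
  | cons x xs ih =>
    have hx := h x (by simp)
    have hc := cap_nonneg xs (fun y hy => h y (by simp [hy]))
    rw [cap_cons] at he
    have h0 : e ≠ 0 := by omega
    have htrim : min e (x - 1) = x - 1 := by omega
    simp only [aLoop, if_neg h0, htrim]
    rw [ih (e - (x - 1)) (fun y hy => h y (by simp [hy])) (by omega)]
    rfl

theorem modify_cons_succ (a : Int) (l : List Int) (k : Nat) (f : Int → Int) :
    (a :: l).modify (k + 1) f = a :: l.modify k f := by
  simp [List.modify]

theorem modify_cons_zero (a : Int) (l : List Int) (f : Int → Int) :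
    (a :: l).modify 0 f = f a :: l := by
  simp [List.modify]

-- the shape B constructs: k leading 1s, the rest of the list, boundary reduced by rem
def buildK (xs : List Int) (k : Nat) (rem : Int) : List Int :=
  if rem > 0 then (List.replicate k 1 ++ xs.drop k).modify k (· - rem)
  else List.replicate k 1 ++ xs.drop k

-- A's greedy loop reaches exactly B's closed-form shape at the breakpoint k
theorem aLoop_char (xs : List Int) (e : Int) (k : Nat)
    (hall : ∀ x ∈ xs, 2 ≤ x) (he : 0 ≤ e) (hcap : e ≤ cap xs) (hk : k ≤ xs.length)
    (h1 : cap (xs.take k) ≤ e)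
    (h2 : k < xs.length → e < cap (xs.take (k + 1))) :
    aLoop xs e = some (buildK xs k (e - cap (xs.take k))) := by
  induction xs generalizing e k with
  | nil =>
    have hk0 : k = 0 := by simpa using hk
    have he0 : e = 0 := by rw [cap_nil] at hcap; omega
    subst hk0; subst he0
    simp [aLoop, buildK, cap]
  | cons x xs ih =>
    have hx : 2 ≤ x := hall x (by simp)
    have hall' : ∀ y ∈ xs, 2 ≤ y := fun y hy => hall y (by simp [hy])
    cases k with
    | zero =>
      by_cases he0 : e = 0
      · subst he0
        simp [aLoop, buildK, cap]
      · have hlen : 0 < (x :: xs).length := by simp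
        have h2' := h2 hlen
        rw [List.take_succ_cons, List.take_zero, cap_cons, cap_nil] at h2'
        have htrim : min e (x - 1) = e := by omega
        simp only [aLoop, if_neg he0, htrim, sub_self, aLoop_zero, Option.map_some]
        simp only [buildK, List.take_zero, cap_nil, sub_zero, List.replicate, List.drop_zero,
          List.nil_append]
        rw [if_pos (by omega : e > 0), modify_cons_zero]
    | succ k' =>
      have hk' : k' ≤ xs.length := by simp at hk; omega
      rw [List.take_succ_cons, cap_cons] at h1
      have hcapt : 0 ≤ cap (xs.take k') :=
        cap_nonneg _ (fun y hy => hall' y (List.mem_of_mem_take hy))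
      have hepos : 0 < e := by omega
      have htrim : min e (x - 1) = x - 1 := by omega
      have hrec := ih (e - (x - 1)) k' hall' (by omega)
        (by rw [cap_cons] at hcap; omega) hk'
        (by omega)
        (by intro hl
            have := h2 (by simpa using Nat.succ_lt_succ hl)
            rw [List.take_succ_cons, cap_cons] at this
            omega)
      have he0 : ¬ (e = 0) := by omega
      simp only [aLoop, if_neg he0, htrim, hrec, Option.map_some]
      congr 1
      have harith : e - (x - 1) - cap (xs.take k') = e - ((x - 1) + cap (xs.take k')) := by ring
      rw [harith]
      set r := e - ((x - 1) + cap (xs.take k')) with hr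
      show (x - (x - 1)) :: buildK xs k' r = buildK (x :: xs) (k' + 1) r
      have hx1 : x - (x - 1) = 1 := by ring
      rw [hx1]
      simp only [buildK, List.drop_succ_cons, List.replicate_succ, List.cons_append]
      by_cases hrp : r > 0
      · rw [if_pos hrp, if_pos hrp, modify_cons_succ]
      · rw [if_neg hrp, if_neg hrp]

-- the costs list [n, n-1, ..., 2]
def costsL (n : Int) : List Int := (PySem.List.pyRange 2 (n + 1) 1).reverse

theorem costs_eq_countdown (n : Int) : costsL n = PySem.List.pyRange n 1 (-1) := by
  rw [PySem.List.pyRange_neg_one_eq_reverse]; norm_num [costsL]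

theorem costs_cons {n : Int} (h : 2 ≤ n) : costsL n = n :: costsL (n - 1) := by
  rw [costs_eq_countdown, PySem.List.pyRange_neg_one_cons (by omega : (1:Int) < n),
    ← costs_eq_countdown]

theorem costs_nil {n : Int} (h : n ≤ 1) : costsL n = [] := by
  rw [costs_eq_countdown, PySem.List.pyRange_neg_one_eq_nil (by omega)]

theorem costs_mem (n x : Int) (hx : x ∈ costsL n) : 2 ≤ x := by
  rw [costsL, List.mem_reverse, PySem.List.mem_pyRange_one] at hx
  exact hx.1

theorem costs_length (n : Int) : ((costsL n).length : Int) = max (n - 1) 0 := by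
  rw [costsL, List.length_reverse, PySem.List.length_pyRange_one]
  omega

theorem costs_sum_ge (n : Int) (h2 : 2 ≤ n) : 2 * (costsL n).sum = (n - 1) * (n + 2) := by
  induction n, h2 using Int.le_induction with
  | base =>
    rw [costs_cons (by norm_num : (2:Int) ≤ 2), costs_nil (by norm_num : (2:Int) - 1 ≤ 1)]
    norm_num
  | succ n hn ih =>
    rw [costs_cons (by omega : (2:Int) ≤ n + 1)]
    have hstep : (n + 1 - 1) = n := by ring
    rw [hstep, List.sum_cons]
    linear_combination ih

theorem costs_sum (n : Int) : 2 * (costsL n).sum = (max (n - 1) 0) * (n + 2) := by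
  by_cases h : n ≤ 1
  · rw [costs_nil h]
    have hmax : max (n - 1) 0 = 0 := by omega
    simp [hmax]
  · have hmax : max (n - 1) 0 = n - 1 := by omega
    rw [hmax, costs_sum_ge n (by omega)]

theorem total_eq (n : Int) :
    PySem.Int.floordiv ((max (n - 1) 0) * (n + 2)) 2 = (costsL n).sum := by
  rw [← costs_sum, half_double]

theorem cap_take_costs (n : Int) (k : Nat) (hk : (k : Int) ≤ max (n - 1) 0) :
    2 * cap ((costsL n).take k) = (k : Int) * (2 * n - k - 1) := by
  induction k generalizing n with
  | zero => simp [cap_nil]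
  | succ k' ih =>
    have hn : 2 ≤ n := by push_cast at hk; omega
    rw [costs_cons hn, List.take_succ_cons, cap_cons]
    have ih' := ih (n - 1) (by push_cast at hk ⊢; omega)
    push_cast
    push_cast at ih'
    linear_combination ih'

theorem costs_drop (n : Int) (k : Nat) (hk : (k : Int) ≤ max (n - 1) 0) :
    (costsL n).drop k = costsL (n - k) := by
  induction k generalizing n with
  | zero => simp
  | succ k' ih =>
    have hn : 2 ≤ n := by push_cast at hk; omega
    rw [costs_cons hn, List.drop_succ_cons, ih (n - 1) (by push_cast at hk ⊢; omega)]
    congr 1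
    push_cast
    ring

-- doubled prefix capacity, as B's arithmetic computes it
def capd (n k : Int) : Int := k * (2 * n - k - 1)

theorem capd_mono (n i j : Int) (h0 : 0 ≤ i) (hij : i ≤ j) (hj : j ≤ max (n - 1) 0) :
    capd n i ≤ capd n j := by
  by_cases heq : i = j
  · subst heq; exact le_refl _
  · have hlt : i < j := lt_of_le_of_ne hij heq
    have hd : capd n j - capd n i = (j - i) * (2 * n - i - j - 1) := by unfold capd; ring
    have hf : (0:Int) ≤ 2 * n - i - j - 1 := by omega
    have := mul_nonneg (by omega : (0:Int) ≤ j - i) hf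
    linarith

theorem bsearchGo_spec (fuel : Nat) : ∀ (n e lo hi : Int), (hi - lo).toNat ≤ fuel →
    0 ≤ lo → lo ≤ hi → hi ≤ max (n - 1) 0 → capd n lo ≤ 2 * e →
    lo ≤ bsearchGo fuel n e lo hi ∧ bsearchGo fuel n e lo hi ≤ hi ∧
    capd n (bsearchGo fuel n e lo hi) ≤ 2 * e ∧
    ∀ j, bsearchGo fuel n e lo hi < j → j ≤ hi → 2 * e < capd n j := by
  induction fuel with
  | zero =>
    intro n e lo hi hf h0 hle hhi hg
    simp only [bsearchGo]
    exact ⟨le_refl _, hle, hg, fun j hj1 hj2 => by omega⟩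
  | succ fuel ih =>
    intro n e lo hi hf h0 hle hhi hg
    simp only [bsearchGo]
    by_cases h : lo < hi
    · rw [if_pos h]
      have hb : PySem.Int.floordiv (lo + hi + 1) 2 = (lo + hi + 1) / 2 :=
        PySem.Int.floordiv_eq_ediv_of_pos (by omega)
      have hlomid : lo < PySem.Int.floordiv (lo + hi + 1) 2 := by rw [hb]; omega
      have hmidhi : PySem.Int.floordiv (lo + hi + 1) 2 ≤ hi := by rw [hb]; omega
      by_cases hc : (PySem.Int.floordiv (lo + hi + 1) 2) * (2 * n - (PySem.Int.floordiv (lo + hi + 1) 2) - 1) ≤ 2 * e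
      · rw [if_pos hc]
        have hrec := ih n e (PySem.Int.floordiv (lo + hi + 1) 2) hi
          (by omega) (by omega) hmidhi hhi (by unfold capd; exact hc)
        exact ⟨by linarith [hrec.1], hrec.2.1, hrec.2.2.1, hrec.2.2.2⟩
      · rw [if_neg hc]
        have hcm : 2 * e < capd n (PySem.Int.floordiv (lo + hi + 1) 2) := by
          unfold capd; omega
        have hrec := ih n e lo ((PySem.Int.floordiv (lo + hi + 1) 2) - 1)
          (by omega) h0 (by omega) (by omega) hg
        refine ⟨hrec.1, by linarith [hrec.2.1], hrec.2.2.1, ?_⟩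
        intro j hj1 hj2
        by_cases hjm : j ≤ (PySem.Int.floordiv (lo + hi + 1) 2) - 1
        · exact hrec.2.2.2 j hj1 hjm
        · have hmono := capd_mono n (PySem.Int.floordiv (lo + hi + 1) 2) j
            (by omega) (by omega) (by omega)
          linarith
    · rw [if_neg h]
      exact ⟨le_refl _, hle, hg, fun j hj1 hj2 => by omega⟩

theorem bsearch_spec (n e lo hi : Int) (h0 : 0 ≤ lo) (hle : lo ≤ hi)
    (hhi : hi ≤ max (n - 1) 0) (hg : capd n lo ≤ 2 * e) :
    lo ≤ bsearch n e lo hi ∧ bsearch n e lo hi ≤ hi ∧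
    capd n (bsearch n e lo hi) ≤ 2 * e ∧
    ∀ j, bsearch n e lo hi < j → j ≤ hi → 2 * e < capd n j :=
  bsearchGo_spec (hi - lo).toNat n e lo hi (le_refl _) h0 hle hhi hg

theorem main_eq (n c : Int) : get_subcosts n c = get_subcosts_alt n c := by
  have hC : (PySem.List.pyRange 2 (n + 1) 1).reverse = costsL n := rfl
  simp only [get_subcosts, get_subcosts_alt, hC]
  have hmem := costs_mem n
  have hlen := costs_length n
  have hsum := (total_eq n).symm
  rw [← hsum]
  set S := (costsL n).sum with hS
  set m := max (n - 1) 0 with hm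
  have hcapL : cap (costsL n) = S - m := by
    rw [cap_eq_sum_sub_len, ← hS, hlen]
  by_cases hneg : S - c < 0
  · rw [if_pos hneg, if_pos (Or.inl hneg)]
  · rw [if_neg hneg]
    by_cases hbig : S - c > S - m
    · rw [if_pos (Or.inr hbig)]
      exact aLoop_none _ _ hmem (by omega)
    · rw [if_neg (by omega : ¬(S - c < 0 ∨ S - c > S - m))]
      set e := S - c with he
      have h0e : 0 ≤ e := by omega
      have hecap : e ≤ cap (costsL n) := by omega
      have hm0 : 0 ≤ m := by omega
      obtain ⟨hk0, hkm, hkle, hkgt⟩ := bsearch_spec n e 0 m (le_refl 0) hm0 (le_refl m)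
        (by unfold capd; simp; omega)
      set k := bsearch n e 0 m with hk
      have hknat : ((k.toNat : Int)) = k := Int.toNat_of_nonneg hk0
      have hkmn : (k.toNat : Int) ≤ m := by omega
      have hcapt := cap_take_costs n k.toNat (by omega)
      rw [hknat] at hcapt
      have hlenk : k.toNat ≤ (costsL n).length := by omega
      have h1 : cap ((costsL n).take k.toNat) ≤ e := by
        unfold capd at hkle; omega
      have h2 : k.toNat < (costsL n).length → e < cap ((costsL n).take (k.toNat + 1)) := by
        intro hl
        have hk1m : k + 1 ≤ m := by omega
        have hgt := hkgt (k + 1) (by omega) hk1m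
        have hcapt1 := cap_take_costs n (k.toNat + 1) (by push_cast; omega)
        unfold capd at hgt
        push_cast [hknat] at hcapt1
        omega
      rw [aLoop_char (costsL n) e k.toNat hmem h0e hecap hlenk h1 h2]
      have hfd : PySem.Int.floordiv (k * (2 * n - k - 1)) 2 = cap ((costsL n).take k.toNat) := by
        rw [← hcapt, half_double]
      rw [hfd]
      have hdrop : (PySem.List.pyRange 2 (n - k + 1) 1).reverse = (costsL n).drop k.toNat := by
        rw [costs_drop n k.toNat (by omega), costsL, hknat]
      rw [hdrop]
      set r := e - cap ((costsL n).take k.toNat) with hr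
      simp only [buildK]
      by_cases hrp : r > 0
      · rw [if_pos hrp, if_pos hrp]
      · rw [if_neg hrp, if_neg hrp]

-- ===== VERDICT (by name: the statement is the Claim_ definition above) =====
theorem get_subcosts_spec : Claim_equal_get_subcosts := by
  intro n c _
  exact main_eq n c
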